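-- pv_equiv track=rewrite | github.com/miya-biz/rdmclient | osfclient/utils.py | _is_path_matched
-- ===== SOURCE A (Python) =====
-- def _is_path_matched(target_file_path, file_path):
--     if target_file_path is None:
--         return True
--     file_path_segs = file_path.split('/')
--     target_file_path_segs = target_file_path.split('/')
--     if file_path_segs[-1] == '':
--         file_path_segs = file_path_segs[:-1]
--     if target_file_path_segs[-1] == '':
--         target_file_path_segs = target_file_path_segs[:-1]
--     for target_file_path_seg, file_path_seg in zip(target_file_path_segs,
--                                                    file_path_segs):
--         if target_file_path_seg.startswith('%') and \
--            target_file_path_seg.endswith('%'):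
--             if target_file_path_seg[1:-1] not in file_path_seg:
--                 return False
--         elif target_file_path_seg.startswith('%'):
--             if not file_path_seg.endswith(target_file_path_seg[1:]):
--                 return False
--         elif target_file_path_seg.endswith('%'):
--             if not file_path_seg.startswith(target_file_path_seg[:-1]):
--                 return False
--         else:
--             if file_path_seg != target_file_path_seg:
--                 return False
--     return True
-- ===== SOURCE B (Python) =====
-- def _segments(path):
--     segs = path.split('/')
--     if segs[-1] == '':
--         segs = segs[:-1]
--     return segs
--
--
-- def _seg_matched(t, f):
--     # anchored-occurrence search: '%' at either end removes that anchor
--     lead = t.startswith('%')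
--     trail = t.endswith('%')
--     inner = t[(1 if lead else 0):(len(t) - (1 if trail else 0))]
--     k, n = len(inner), len(f)
--     starts = range(n - k + 1) if lead else range(1)
--     return any((trail or i + k == n) and f[i:i + k] == inner for i in starts)
--
--
-- def _is_path_matched(target_file_path, file_path):
--     if target_file_path is None:
--         return True
--     return all(_seg_matched(t, f)
--                for t, f in zip(_segments(target_file_path),
--                                _segments(file_path)))
-- ===== Notes on version B (the rewrite author's own statement) =====
-- stated objective: alternative
-- what changed: Replaces A's four-way startswith/endswith/substring branch per segment with a single uniform anchored-occurrence search (any() over candidate start positions, a '%' at either end of the target segment removing that anchor), and the early-return loop with all() over the zipped segments.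
import Mathlib
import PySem

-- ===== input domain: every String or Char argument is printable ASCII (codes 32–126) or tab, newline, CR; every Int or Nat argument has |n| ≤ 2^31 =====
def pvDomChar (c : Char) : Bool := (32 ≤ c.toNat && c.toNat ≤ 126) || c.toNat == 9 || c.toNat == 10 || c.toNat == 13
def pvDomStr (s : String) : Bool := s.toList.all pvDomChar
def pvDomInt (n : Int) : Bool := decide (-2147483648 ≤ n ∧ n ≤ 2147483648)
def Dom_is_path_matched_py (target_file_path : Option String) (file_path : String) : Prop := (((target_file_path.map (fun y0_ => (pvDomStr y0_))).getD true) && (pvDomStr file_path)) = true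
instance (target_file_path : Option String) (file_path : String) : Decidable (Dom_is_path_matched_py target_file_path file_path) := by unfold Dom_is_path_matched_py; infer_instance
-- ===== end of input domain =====

-- B replaces A's four startswith/endswith/contains branches by one uniform anchored-occurrence
-- search per segment ('%' at an end removes that anchor) — objective: alternative.


-- ===== PORT A =====
-- `segs[-1] == ''` then `segs = segs[:-1]` (split never returns an empty list, so `[-1]` never raises)
def pvTrimA (segs : List (List Char)) : List (List Char) :=
  if PySem.List.pyGet? segs (-1) == some ([] : List Char) then
    PySem.List.slice segs none (some (-1))
  else segs

-- the `for … in zip(…)` loop with its early `return False`s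
def pvLoopA : List (List Char × List Char) → Bool
  | [] => true
  | (tseg, fseg) :: rest =>
    if PySem.Chars.startswith tseg ['%'] && PySem.Chars.endswith tseg ['%'] then
      if !PySem.Chars.isIn (PySem.List.slice tseg (some 1) (some (-1))) fseg then false
      else pvLoopA rest
    else if PySem.Chars.startswith tseg ['%'] then
      if !PySem.Chars.endswith fseg (PySem.List.slice tseg (some 1) none) then false
      else pvLoopA rest
    else if PySem.Chars.endswith tseg ['%'] then
      if !PySem.Chars.startswith fseg (PySem.List.slice tseg none (some (-1))) then false
      else pvLoopA rest
    else
      if fseg ≠ tseg then false else pvLoopA rest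

def is_path_matched_py (target_file_path : Option String) (file_path : String) : Bool :=
  match target_file_path with
  | none => true
  | some target =>
    let file_path_segs := pvTrimA (PySem.Chars.splitOn file_path.toList ['/'])
    let target_file_path_segs := pvTrimA (PySem.Chars.splitOn target.toList ['/'])
    pvLoopA (target_file_path_segs.zip file_path_segs)

-- ===== PORT B =====
def pvSegments (path : List Char) : List (List Char) :=
  let segs := PySem.Chars.splitOn path ['/']
  if PySem.List.pyGet? segs (-1) == some ([] : List Char) then
    PySem.List.slice segs none (some (-1))
  else segs

-- anchored-occurrence search: '%' at either end removes that anchor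
def pvSegMatched (t f : List Char) : Bool :=
  let lead := PySem.Chars.startswith t ['%']
  let trail := PySem.Chars.endswith t ['%']
  let inner := PySem.List.slice t (some (if lead then 1 else 0))
      (some ((t.length : Int) - (if trail then 1 else 0)))
  let k := inner.length
  let n := f.length
  let starts := if lead then PySem.List.pyRange 0 ((n : Int) - (k : Int) + 1) 1
                else PySem.List.pyRange 0 1 1
  starts.any (fun i =>
    (trail || (i + (k : Int) == (n : Int))) &&
    (PySem.List.slice f (some i) (some (i + (k : Int))) == inner))

def is_path_matched_py_alt (target_file_path : Option String) (file_path : String) : Bool :=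
  match target_file_path with
  | none => true
  | some target =>
    ((pvSegments target.toList).zip (pvSegments file_path.toList)).all
      (fun p => pvSegMatched p.1 p.2)

-- ===== PRECONDITION & SPEC =====
def Spec_is_path_matched_py (target_file_path : Option String) (file_path : String) (out : Bool) : Prop := out = is_path_matched_py_alt target_file_path file_path
instance (target_file_path : Option String) (file_path : String) (out : Bool) : Decidable (Spec_is_path_matched_py target_file_path file_path out) := by unfold Spec_is_path_matched_py; infer_instance

-- ===== CLAIM (what is proved, stated in full; the proofs are below) =====
def Claim_equal_is_path_matched_py : Prop := ∀ (target_file_path : Option String) (file_path : String), Dom_is_path_matched_py target_file_path file_path → Spec_is_path_matched_py target_file_path file_path (is_path_matched_py target_file_path file_path)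

-- ===== LEMMAS AND PROOFS =====

-- an infix is exactly a take-of-a-drop at a bounded offset
theorem pv_infix_iff (sub f : List Char) :
    sub <:+: f ↔ ∃ j : Nat, j + sub.length ≤ f.length ∧ (f.drop j).take sub.length = sub := by
  constructor
  · rintro ⟨s, t, rfl⟩
    refine ⟨s.length, by simp, ?_⟩
    rw [List.append_assoc, List.drop_left, List.take_left]
  · rintro ⟨j, hj, hsub⟩
    rw [← hsub]
    exact (List.take_prefix _ _).isInfix.trans (List.drop_suffix _ _).isInfix

-- case '%…%': searching all start positions is substring containment
theorem pv_case_both (inner f : List Char) :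
    ((PySem.List.pyRange 0 ((f.length : Int) - (inner.length : Int) + 1) 1).any fun i =>
      PySem.List.slice f (some i) (some (i + (inner.length : Int))) == inner) =
    PySem.Chars.isIn inner f := by
  rw [Bool.eq_iff_iff]
  simp only [List.any_eq_true, PySem.List.mem_pyRange_one,
    PySem.Chars.isIn_iff_infix, pv_infix_iff, beq_iff_eq]
  constructor
  · rintro ⟨i, ⟨h0, hlt⟩, hs⟩
    refine ⟨i.toNat, by omega, ?_⟩
    rw [PySem.List.slice_toNat f h0 (by omega)] at hs
    have h1 : (i + (inner.length : Int)).toNat - i.toNat = inner.length := by omega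
    rwa [h1] at hs
  · rintro ⟨j, hj, hs⟩
    refine ⟨(j : Int), ⟨by omega, by omega⟩, ?_⟩
    rw [PySem.List.slice_toNat f (by omega) (by omega)]
    have h1 : ((j : Int) + (inner.length : Int)).toNat - (j : Int).toNat = inner.length := by omega
    rw [h1]; simpa using hs

-- case '%…': the kept end anchor makes the search an endswith test
theorem pv_case_lead (inner f : List Char) :
    ((PySem.List.pyRange 0 ((f.length : Int) - (inner.length : Int) + 1) 1).any fun i =>
      (i + (inner.length : Int) == (f.length : Int)) &&
      (PySem.List.slice f (some i) (some (i + (inner.length : Int))) == inner)) =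
    PySem.Chars.endswith f inner := by
  rw [Bool.eq_iff_iff]
  simp only [List.any_eq_true, PySem.List.mem_pyRange_one, Bool.and_eq_true,
    beq_iff_eq, PySem.Chars.endswith_iff, List.suffix_iff_eq_drop]
  constructor
  · rintro ⟨i, ⟨h0, hlt⟩, hik, hs⟩
    rw [PySem.List.slice_toNat f h0 (by omega)] at hs
    have h1 : (i + (inner.length : Int)).toNat - i.toNat = inner.length := by omega
    have h2 : i.toNat = f.length - inner.length := by omega
    rw [h1, h2] at hs
    have hlen : (f.drop (f.length - inner.length)).length ≤ inner.length := by
      simp; omega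
    rw [List.take_of_length_le hlen] at hs
    exact hs.symm
  · intro hs
    have hk : inner.length ≤ f.length := by
      have := congrArg List.length hs
      simp at this; omega
    refine ⟨(f.length : Int) - inner.length, ⟨by omega, by omega⟩, by omega, ?_⟩
    rw [PySem.List.slice_toNat f (by omega) (by omega)]
    have h1 : ((f.length : Int) - (inner.length : Int) + inner.length).toNat - ((f.length : Int) - (inner.length : Int)).toNat = inner.length := by omega
    have h2 : ((f.length : Int) - (inner.length : Int)).toNat = f.length - inner.length := by omega
    rw [h1, h2]
    conv_rhs => rw [hs]
    exact List.take_of_length_le (by simp; omega)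

-- case '…%': start position 0 with the end anchor removed is a startswith test
theorem pv_case_trail (inner f : List Char) :
    ((PySem.List.pyRange 0 1 1).any fun i =>
      PySem.List.slice f (some i) (some (i + (inner.length : Int))) == inner) =
    PySem.Chars.startswith f inner := by
  have hr : PySem.List.pyRange 0 1 1 = [0] := by decide
  rw [Bool.eq_iff_iff, hr]
  simp only [List.any_cons, List.any_nil, Bool.or_false,
    beq_iff_eq, PySem.Chars.startswith_iff, List.prefix_iff_eq_take]
  rw [PySem.List.slice_toNat f (by omega) (by omega)]
  simp [eq_comm]

-- case no '%': start position 0 with both anchors kept is equality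
theorem pv_case_none (inner f : List Char) :
    ((PySem.List.pyRange 0 1 1).any fun i =>
      (i + (inner.length : Int) == (f.length : Int)) &&
      (PySem.List.slice f (some i) (some (i + (inner.length : Int))) == inner)) =
    (f == inner) := by
  have hr : PySem.List.pyRange 0 1 1 = [0] := by decide
  rw [Bool.eq_iff_iff, hr]
  simp only [List.any_cons, List.any_nil, Bool.or_false, Bool.and_eq_true, beq_iff_eq]
  rw [PySem.List.slice_toNat f (by omega) (by omega)]
  simp only [Int.toNat_zero, List.drop_zero]
  constructor
  · rintro ⟨hk, hs⟩
    have hlen : inner.length = f.length := by omega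
    have h4 : ((0 : Int) + (f.length : Int)).toNat - 0 = f.length := by omega
    rw [← hs, hlen, h4, List.take_length]
  · rintro rfl
    simp

-- B's inner slice equals A's slice operand, case by case
theorem pv_slice_b1 (t : List Char) :
    PySem.List.slice t (some 1) (some ((t.length : Int) - 1)) = PySem.List.slice t (some 1) (some (-1)) := by
  simp [PySem.List.slice, PySem.List.clampIdx]
  split_ifs <;> simp_all; omega

theorem pv_slice_b2 (t : List Char) :
    PySem.List.slice t (some 1) (some ((t.length : Int))) = PySem.List.slice t (some 1) none := by
  simp [PySem.List.slice, PySem.List.clampIdx]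
  split_ifs <;> omega

theorem pv_slice_b3 (t : List Char) :
    PySem.List.slice t (some 0) (some ((t.length : Int) - 1)) = PySem.List.slice t none (some (-1)) := by
  simp [PySem.List.slice, PySem.List.clampIdx]
  split_ifs <;> simp_all; omega

theorem pv_slice_b4 (t : List Char) :
    PySem.List.slice t (some 0) (some ((t.length : Int))) = t := by
  simp [PySem.List.slice, PySem.List.clampIdx]
  split_ifs <;> omega

-- per segment: B's anchored search equals A's branch test
theorem pv_seg_eq (t f : List Char) :
    pvSegMatched t f =
      (if PySem.Chars.startswith t ['%'] && PySem.Chars.endswith t ['%'] then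
        PySem.Chars.isIn (PySem.List.slice t (some 1) (some (-1))) f
      else if PySem.Chars.startswith t ['%'] then
        PySem.Chars.endswith f (PySem.List.slice t (some 1) none)
      else if PySem.Chars.endswith t ['%'] then
        PySem.Chars.startswith f (PySem.List.slice t none (some (-1)))
      else (f == t)) := by
  by_cases hs : PySem.Chars.startswith t ['%'] = true <;>
    by_cases he : PySem.Chars.endswith t ['%'] = true
  · simp only [pvSegMatched, hs, he, if_true, Bool.true_or, Bool.true_and, Bool.and_self]
    rw [pv_slice_b1, pv_case_both]
  · simp only [pvSegMatched, hs, he, if_true, if_false, Bool.false_or, Bool.and_false,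
      Bool.false_eq_true, sub_zero]
    rw [pv_slice_b2, pv_case_lead]
  · simp only [pvSegMatched, hs, he, if_true, if_false, Bool.true_or, Bool.true_and,
      Bool.false_and, Bool.false_eq_true]
    rw [pv_slice_b3, pv_case_trail]
  · simp only [pvSegMatched, hs, he, if_false, Bool.false_or, Bool.false_and,
      Bool.false_eq_true, sub_zero]
    rw [pv_slice_b4, pv_case_none]

theorem pv_loop_eq (l : List (List Char × List Char)) :
    pvLoopA l = l.all (fun p => pvSegMatched p.1 p.2) := by
  induction l with
  | nil => rfl
  | cons hd tl ih =>
    obtain ⟨t, f⟩ := hd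
    simp only [List.all_cons, pvLoopA, pv_seg_eq t f]
    by_cases h1 : PySem.Chars.startswith t ['%'] && PySem.Chars.endswith t ['%'] <;>
      by_cases h2 : PySem.Chars.startswith t ['%'] = true <;>
      by_cases h3 : PySem.Chars.endswith t ['%'] = true <;>
      by_cases h4 : f = t <;>
      simp_all

-- ===== VERDICT (by name: the statement is the Claim_ definition above) =====
theorem is_path_matched_py_spec : Claim_equal_is_path_matched_py := by
  intro target_file_path file_path _
  unfold Spec_is_path_matched_py is_path_matched_py is_path_matched_py_alt
  cases target_file_path with
  | none => rfl
  | some target =>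
    simp only [pvSegments, pvTrimA, pv_loop_eq]
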